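-- pv_equiv track=rewrite | github.com/Frank-LSY/data-interview | 数据分析-code-data/chapter-8/code/apriori.py | connect_string
-- ===== SOURCE A (Python) =====
-- def connect_string(x,ms):
--     x = list(map(lambda i:sorted(i.split(ms)),x))
--     r = []
--     for i in range(len(x)):
--         for j in range(i+1,len(x)):
--             if x[i][:-1]==x[j][:-1] and x[i][-1]!=x[j][-1]:
--                 r.append(x[i][:-1]+sorted([x[i][-1],x[j][-1]]))
--     return r
-- ===== SOURCE B (Python) =====
-- def connect_string(x, ms):
--     xs = [sorted(s.split(ms)) for s in x]
--     # group the last elements by their (sorted) prefix, in order of appearance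
--     groups = {}
--     for item in xs:
--         groups.setdefault(tuple(item[:-1]), []).append(item[-1])
--     r = []
--     seen = {}
--     for item in xs:
--         key = tuple(item[:-1])
--         p = seen.get(key, 0)
--         seen[key] = p + 1
--         a = item[-1]
--         pre = item[:-1]
--         for b in groups[key][p + 1:]:
--             if b != a:
--                 r.append(pre + ([a, b] if a <= b else [b, a]))
--     return r
-- ===== Notes on version B (the rewrite author's own statement) =====
-- stated objective: faster
-- what changed: Replaces the all-pairs O(n^2) double loop with a dict that groups itemsets by their sorted prefix, then pairs each itemset only with the later members of its own prefix group (positions tracked by a per-prefix counter), preserving A's exact (i,j) output order.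
import Mathlib
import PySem

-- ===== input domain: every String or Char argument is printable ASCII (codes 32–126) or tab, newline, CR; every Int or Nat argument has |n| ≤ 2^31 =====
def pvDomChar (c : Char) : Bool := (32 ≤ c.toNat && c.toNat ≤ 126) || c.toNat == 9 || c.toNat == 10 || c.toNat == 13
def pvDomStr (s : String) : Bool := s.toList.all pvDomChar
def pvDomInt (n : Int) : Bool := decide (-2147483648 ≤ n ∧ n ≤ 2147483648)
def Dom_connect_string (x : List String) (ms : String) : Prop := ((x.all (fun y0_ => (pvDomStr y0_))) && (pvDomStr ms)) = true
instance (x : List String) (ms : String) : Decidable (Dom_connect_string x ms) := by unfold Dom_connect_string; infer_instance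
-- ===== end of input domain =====

-- B replaces A's all-pairs double loop by a dict grouping itemsets by prefix and pairing
-- each itemset only with later members of its own prefix group (objective: faster; the
-- timing run measures the speed-up; equivalence of the RETURN value is proved below).

-- ===== PORT A =====
-- A: x = list(map(lambda i: sorted(i.split(ms)), x)); double loop over index pairs i < j;
--    append x[i][:-1] + sorted([x[i][-1], x[j][-1]]) when prefixes match and lasts differ.
-- s.split(ms) is PySem.Str.split? (none only when ms = "", excluded by Pre_; .getD [] is exact otherwise).
def connect_string (x : List String) (ms : String) : List (List String) :=
  let xs := x.map (fun i => PySem.List.sorted ((PySem.Str.split? i ms).getD []) (fun z => z) false)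
  let n : Int := (xs.length : Int)
  (PySem.List.pyRange 0 n 1).foldl (fun r i =>
    (PySem.List.pyRange (i + 1) n 1).foldl (fun r j =>
      let xi := PySem.List.pyGetD xs i []
      let xj := PySem.List.pyGetD xs j []
      if PySem.List.slice xi none (some (-1)) = PySem.List.slice xj none (some (-1)) ∧
          PySem.List.pyGetD xi (-1) "" ≠ PySem.List.pyGetD xj (-1) "" then
        r ++ [PySem.List.slice xi none (some (-1)) ++
              PySem.List.sorted [PySem.List.pyGetD xi (-1) "", PySem.List.pyGetD xj (-1) ""] (fun z => z) false]
      else r) r) []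

-- ===== PORT B =====
-- B (Source B): first pass groups the last elements by prefix (dict, setdefault+append);
-- second pass pairs each itemset with the later members of its own group, the position
-- tracked by a per-prefix counter dict `seen`.
-- groups.setdefault(key, []).append(a)  =  Dict.modify key [] (· ++ [a])
def bGroups (xs : List (List String)) : PySem.Dict (List String) (List String) :=
  xs.foldl (fun d item =>
    d.modify (PySem.List.slice item none (some (-1))) [] (· ++ [PySem.List.pyGetD item (-1) ""]))
    PySem.Dict.empty

-- the body of Source B's second loop (state: (seen, r)); groups[key] is getD [] (the key is
-- always present, inserted by the first pass, so this is exact — Python's [] lookup).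
def bStep (groups : PySem.Dict (List String) (List String))
    (st : PySem.Dict (List String) Int × List (List String)) (item : List String) :
    PySem.Dict (List String) Int × List (List String) :=
  let key := PySem.List.slice item none (some (-1))
  let p := st.1.getD key 0
  let a := PySem.List.pyGetD item (-1) ""
  let r' := (PySem.List.slice (groups.getD key []) (some (p + 1)) none).foldl
      (fun r b => if b ≠ a then r ++ [key ++ (if a ≤ b then [a, b] else [b, a])] else r) st.2
  (st.1.insert key (p + 1), r')

def connect_string_alt (x : List String) (ms : String) : List (List String) :=
  let xs := x.map (fun s => PySem.List.sorted ((PySem.Str.split? s ms).getD []) (fun z => z) false)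
  (xs.foldl (bStep (bGroups xs)) (PySem.Dict.empty, [])).2

-- ===== PRECONDITION & SPEC =====
-- Python's str.split raises ValueError on an empty separator: ms = "" is excluded.
def Pre_connect_string (x : List String) (ms : String) : Prop := ms.toList ≠ []
instance (x : List String) (ms : String) : Decidable (Pre_connect_string x ms) := by
  unfold Pre_connect_string; infer_instance

def pvWitness_connect_string : List String × String := (["b,a", "a,c"], ",")

def Spec_connect_string (x : List String) (ms : String) (out : List (List String)) : Prop := out = connect_string_alt x ms
instance (x : List String) (ms : String) (out : List (List String)) : Decidable (Spec_connect_string x ms out) := by unfold Spec_connect_string; infer_instance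

-- ===== CLAIM (what is proved, stated in full; the proofs are below) =====
def Claim_equal_connect_string : Prop := ∀ (x : List String) (ms : String), Dom_connect_string x ms → Pre_connect_string x ms → Spec_connect_string x ms (connect_string x ms)

-- ===== LEMMAS AND PROOFS =====

-- x[-1] in both programs, as a total function (both programs only apply it to nonempty lists)
def lastS (l : List String) : String := PySem.List.pyGetD l (-1) ""

-- sorted([a, b]) for two strings (B writes the branch out; A calls sorted)
def mrg (a b : String) : List String := if a ≤ b then [a, b] else [b, a]

-- canonical form of A's double loop: recursion on suffixes
def rowsA : List (List String) → List (List String)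
  | [] => []
  | it :: rest =>
    ((rest.filter (fun l => decide (it.dropLast = l.dropLast ∧ lastS it ≠ lastS l))).map
        (fun l => it.dropLast ++ mrg (lastS it) (lastS l)))
      ++ rowsA rest

-- canonical form of B's second loop, parametrised by the groups dict and the seen dict
def rowsB (groups : PySem.Dict (List String) (List String)) :
    PySem.Dict (List String) Int → List (List String) → List (List String)
  | _, [] => []
  | seen, it :: rest =>
    ((PySem.List.slice (groups.getD it.dropLast []) (some (seen.getD it.dropLast 0 + 1)) none).filter
          (fun b => decide (b ≠ lastS it))).map (fun b => it.dropLast ++ mrg (lastS it) b)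
      ++ rowsB groups (seen.insert it.dropLast (seen.getD it.dropLast 0 + 1)) rest

-- the seen dict after the second loop has processed `done`
def seenOf (done : List (List String)) : PySem.Dict (List String) Int :=
  done.foldl (fun d it => d.insert it.dropLast (d.getD it.dropLast 0 + 1)) PySem.Dict.empty



-- sorted([a,b]) on two strings is the explicit two-way branch B writes
theorem sorted_pair (a b : String) :
    PySem.List.sorted [a, b] (fun z => z) false = mrg a b := by
  unfold mrg
  by_cases hab : a ≤ b
  · rw [if_pos hab]
    exact PySem.List.sorted_id_eq_of_perm_of_pairwise _ _ (List.Perm.refl _)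
      (List.pairwise_pair.mpr hab)
  · rw [if_neg hab]
    exact PySem.List.sorted_id_eq_of_perm_of_pairwise _ _ (List.Perm.swap _ _ _)
      (List.pairwise_pair.mpr (le_of_not_ge hab))

-- Prop-valued form of PySem.List.foldl_append_if ('if p(x): out.append(f(x))')
theorem foldl_append_ite {A B : Type} (P : A → Prop) [DecidablePred P] (f : A → B)
    (l : List A) (acc : List B) :
    l.foldl (fun acc x => if P x then acc ++ [f x] else acc) acc
      = acc ++ (l.filter (fun x => decide (P x))).map f := by
  rw [← PySem.List.foldl_append_if (fun x => decide (P x)) f l acc]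
  exact PySem.List.foldl_congr_mem _ _ _ _
    (by intro acc x _; by_cases h : P x <;> simp [h])

-- A's row for index i, exactly as A's inner loop leaves it
def gA (ys : List (List String)) (i : Int) : List (List String) :=
  ((ys.drop (i + 1).toNat).filter (fun l => decide
      (PySem.List.slice (PySem.List.pyGetD ys i []) none (some (-1)) = PySem.List.slice l none (some (-1)) ∧
        PySem.List.pyGetD (PySem.List.pyGetD ys i []) (-1) "" ≠ PySem.List.pyGetD l (-1) ""))).map
    (fun l => PySem.List.slice (PySem.List.pyGetD ys i []) none (some (-1)) ++
      PySem.List.sorted [PySem.List.pyGetD (PySem.List.pyGetD ys i []) (-1) "", PySem.List.pyGetD l (-1) ""]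
        (fun z => z) false)

-- A's row at a Nat index, in getD/dropLast form
def gN (ys : List (List String)) (k : Nat) : List (List String) :=
  ((ys.drop (k + 1)).filter (fun l => decide
      ((ys.getD k []).dropLast = l.dropLast ∧ lastS (ys.getD k []) ≠ lastS l))).map
    (fun l => (ys.getD k []).dropLast ++ mrg (lastS (ys.getD k [])) (lastS l))

theorem gA_natCast (ys : List (List String)) (k : Nat) : gA ys (k : Int) = gN ys k := by
  unfold gA gN
  have ht : ((k : Int) + 1).toNat = k + 1 := by omega
  simp only [ht, PySem.List.pyGetD_natCast, PySem.List.slice_to_neg_one, sorted_pair, lastS]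
  rfl

theorem gN_cons_succ (it : List String) (rest : List (List String)) (k : Nat) :
    gN (it :: rest) (k + 1) = gN rest k := rfl

theorem flatMap_gN (ys : List (List String)) :
    (List.range ys.length).flatMap (fun k => gN ys k) = rowsA ys := by
  induction ys with
  | nil => simp [rowsA]
  | cons it rest ih =>
    rw [List.length_cons, List.range_succ_eq_map, List.flatMap_cons, List.flatMap_map]
    have h2 : (List.range rest.length).flatMap (fun a => gN (it :: rest) (Nat.succ a)) = rowsA rest := by
      rw [show (fun a => gN (it :: rest) (Nat.succ a)) = fun a => gN rest a from
        funext fun a => gN_cons_succ it rest a]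
      exact ih
    rw [h2]
    show gN (it :: rest) 0 ++ rowsA rest = rowsA (it :: rest)
    rfl

theorem A_eq_rowsA (ys : List (List String)) :
    (PySem.List.pyRange 0 (ys.length : Int) 1).foldl (fun r i =>
      (PySem.List.pyRange (i + 1) (ys.length : Int) 1).foldl (fun r j =>
        let xi := PySem.List.pyGetD ys i []
        let xj := PySem.List.pyGetD ys j []
        if PySem.List.slice xi none (some (-1)) = PySem.List.slice xj none (some (-1)) ∧
            PySem.List.pyGetD xi (-1) "" ≠ PySem.List.pyGetD xj (-1) "" then
          r ++ [PySem.List.slice xi none (some (-1)) ++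
                PySem.List.sorted [PySem.List.pyGetD xi (-1) "", PySem.List.pyGetD xj (-1) ""] (fun z => z) false]
        else r) r) [] = rowsA ys := by
  rw [PySem.List.foldl_congr_mem _ _ (fun r i => r ++ gA ys i) []
    (by
      intro r i hi
      rw [PySem.List.mem_pyRange_one] at hi
      show (PySem.List.pyRange (i + 1) ((ys.length : Int)) 1).foldl _ r = _
      rw [PySem.List.foldl_pyRange_pyGetD' ys []
        (fun acc (b : List String) =>
          if PySem.List.slice (PySem.List.pyGetD ys i []) none (some (-1)) = PySem.List.slice b none (some (-1)) ∧
              PySem.List.pyGetD (PySem.List.pyGetD ys i []) (-1) "" ≠ PySem.List.pyGetD b (-1) "" then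
            acc ++ [PySem.List.slice (PySem.List.pyGetD ys i []) none (some (-1)) ++
              PySem.List.sorted [PySem.List.pyGetD (PySem.List.pyGetD ys i []) (-1) "", PySem.List.pyGetD b (-1) ""]
                (fun z => z) false]
          else acc) r (by omega)]
      exact foldl_append_ite _ _ _ r)]
  rw [PySem.List.foldl_append_eq_flatMap, List.nil_append, PySem.List.pyRange_one,
    List.flatMap_map]
  have hl : ((ys.length : Int) - 0).toNat = ys.length := by omega
  rw [hl]
  have hf : (fun (a : Nat) => gA ys (0 + (a : Int))) = fun a => gN ys a :=
    funext fun a => by rw [zero_add, gA_natCast]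
  rw [hf, flatMap_gN]

theorem B_loop (groups : PySem.Dict (List String) (List String)) :
    ∀ (rest : List (List String)) (seen : PySem.Dict (List String) Int) (r : List (List String)),
    (rest.foldl (bStep groups) (seen, r)).2 = r ++ rowsB groups seen rest := by
  intro rest
  induction rest with
  | nil =>
    intro seen r
    rw [List.foldl_nil]
    show r = r ++ rowsB groups seen []
    rw [show rowsB groups seen [] = [] from rfl, List.append_nil]
  | cons it rest ih =>
    intro seen r
    have hb : bStep groups (seen, r) it =
        (seen.insert (PySem.List.slice it none (some (-1)))
            (seen.getD (PySem.List.slice it none (some (-1))) 0 + 1),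
          (PySem.List.slice (groups.getD (PySem.List.slice it none (some (-1))) [])
              (some (seen.getD (PySem.List.slice it none (some (-1))) 0 + 1)) none).foldl
            (fun r b => if b ≠ PySem.List.pyGetD it (-1) "" then
                r ++ [PySem.List.slice it none (some (-1)) ++
                  (if PySem.List.pyGetD it (-1) "" ≤ b then [PySem.List.pyGetD it (-1) "", b]
                   else [b, PySem.List.pyGetD it (-1) ""])]
              else r) r) := rfl
    rw [List.foldl_cons, hb, ih, foldl_append_ite, List.append_assoc]
    congr 1
    rw [show rowsB groups seen (it :: rest)
        = ((PySem.List.slice (groups.getD it.dropLast []) (some (seen.getD it.dropLast 0 + 1)) none).filter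
              (fun b => decide (b ≠ lastS it))).map (fun b => it.dropLast ++ mrg (lastS it) b)
          ++ rowsB groups (seen.insert it.dropLast (seen.getD it.dropLast 0 + 1)) rest from rfl]
    simp only [PySem.List.slice_to_neg_one, lastS, mrg]
    rfl

theorem groups_getD (ys : List (List String)) (k : List String) :
    (bGroups ys).getD k [] = (ys.filter (fun l => l.dropLast == k)).map lastS := by
  have h := PySem.Dict.getD_foldl_modify_append (ys.map (fun l => (l.dropLast, lastS l)))
    PySem.Dict.empty k
  rw [List.foldl_map] at h
  unfold bGroups
  simp only [PySem.List.slice_to_neg_one]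
  refine Eq.trans ?_ (h.trans ?_)
  · rfl
  · rw [PySem.Dict.getD_empty, List.nil_append, List.filter_map, List.map_map]
    rfl

theorem seen_getD (done : List (List String)) (k : List String) :
    (seenOf done).getD k 0 = ((done.filter (fun l => l.dropLast == k)).length : Int) := by
  have h := PySem.Dict.getD_foldl_insert_add_one (done.map List.dropLast) PySem.Dict.empty k
  rw [List.foldl_map] at h
  unfold seenOf
  refine Eq.trans ?_ (h.trans ?_)
  · rfl
  · rw [PySem.Dict.getD_empty, List.count_eq_countP, List.countP_map, zero_add,
      List.countP_eq_length_filter]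
    rfl

theorem seenOf_append (done : List (List String)) (it : List String) :
    seenOf (done ++ [it])
      = (seenOf done).insert it.dropLast ((seenOf done).getD it.dropLast 0 + 1) := by
  simp [seenOf, List.foldl_append]

theorem rowsB_eq_rowsA (ys : List (List String)) :
    ∀ (rest done : List (List String)), ys = done ++ rest →
    rowsB (bGroups ys) (seenOf done) rest = rowsA rest := by
  intro rest
  induction rest with
  | nil => intro done h; simp [rowsA, rowsB]
  | cons it rest ih =>
    intro done h
    unfold rowsB rowsA
    rw [← seenOf_append, ih (done ++ [it]) (by simp [h])]
    congr 1
    rw [seen_getD, groups_getD, h, List.filter_append, List.filter_cons, if_pos (by simp),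
      List.map_append, List.map_cons]
    set c := (List.filter (fun l => l.dropLast == it.dropLast) done).length with hc
    rw [PySem.List.slice_from _ (by omega : (0:Int) ≤ (c:Int) + 1)]
    rw [(by omega : ((c:Int) + 1).toNat = c + 1)]
    rw [show (List.map lastS (List.filter (fun l => l.dropLast == it.dropLast) done) ++
          lastS it :: List.map lastS (List.filter (fun l => l.dropLast == it.dropLast) rest))
        = (List.map lastS (List.filter (fun l => l.dropLast == it.dropLast) done) ++ [lastS it]) ++
          List.map lastS (List.filter (fun l => l.dropLast == it.dropLast) rest) by simp]
    rw [List.drop_left' (by simp [hc])]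
    rw [List.filter_map, List.map_map, List.filter_filter]
    refine congrArg₂ List.map rfl ?_
    apply List.filter_congr
    intro l _
    simp only [Function.comp_apply]
    by_cases h1 : it.dropLast = l.dropLast
    · by_cases h2 : lastS it = lastS l
      · simp [h1, h2]
      · have h2' : lastS l ≠ lastS it := fun e => h2 e.symm
        simp [h1, h2, h2']
    · have h1' : ¬ l.dropLast = it.dropLast := fun e => h1 e.symm
      simp [h1, h1']

-- ===== VERDICT (by name: the statement is the Claim_ definition above) =====
theorem connect_string_spec : Claim_equal_connect_string := by
  intro x ms _ _
  unfold Spec_connect_string connect_string connect_string_alt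
  generalize List.map (fun s => PySem.List.sorted ((PySem.Str.split? s ms).getD []) (fun z => z) false) x = ys
  rw [B_loop, A_eq_rowsA, List.nil_append,
    ← rowsB_eq_rowsA ys ys [] rfl]
  rfl
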